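-- pv_equiv track=rewrite | github.com/PythonGoesReddit/Reddit_MDA | Reddit_Bibers_Features.py | feature_46
-- ===== SOURCE A (Python) =====
-- def feature_46(untagged_list):
--     """This function takes a list of words without PoS tags as input and returns the number of items
--     that are downtoners."""
--     counter = 0
--     downtonerlist = ["almost", "barely", "hardly", "merely", "mildly", "nearly", "only",
--                      "partially", "partly", "practically", "scarcely", "slightly", "somewhat"]
--     for item in untagged_list:
--         if item in downtonerlist:
--             counter = counter + 1
--         else:
--             pass
--     return(counter)
-- ===== SOURCE B (Python) =====
-- def feature_46(untagged_list):
--     """This function takes a list of words without PoS tags as input and returns the number of items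
--     that are downtoners."""
--     downtonerlist = ["almost", "barely", "hardly", "merely", "mildly", "nearly", "only",
--                      "partially", "partly", "practically", "scarcely", "slightly", "somewhat"]
--     freq = {}
--     for item in untagged_list:
--         freq[item] = freq.get(item, 0) + 1
--     return sum(freq.get(w, 0) for w in downtonerlist)
-- ===== Notes on version B (the rewrite author's own statement) =====
-- stated objective: alternative
-- what changed: B tabulates the input into a frequency dict in one pass and then sums the counts of the 13 fixed downtoner words, instead of scanning the input and testing each word's membership in the fixed list.
import Mathlib
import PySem

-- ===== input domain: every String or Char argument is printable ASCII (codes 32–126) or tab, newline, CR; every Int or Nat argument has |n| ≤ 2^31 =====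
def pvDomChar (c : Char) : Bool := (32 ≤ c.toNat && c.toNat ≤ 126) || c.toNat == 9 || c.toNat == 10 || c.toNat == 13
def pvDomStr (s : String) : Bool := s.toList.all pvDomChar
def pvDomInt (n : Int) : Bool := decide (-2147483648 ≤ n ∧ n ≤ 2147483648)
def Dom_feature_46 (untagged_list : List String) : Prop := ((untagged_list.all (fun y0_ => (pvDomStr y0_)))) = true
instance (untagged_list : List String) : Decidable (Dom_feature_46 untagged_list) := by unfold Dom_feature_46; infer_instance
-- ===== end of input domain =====

-- B's change: B tabulates the input into a frequency dict in one pass, then sums the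
-- counts of the 13 fixed downtoner words; A scans the input testing list membership.

-- ===== PORT A =====
def downtonerList : List String :=
  ["almost", "barely", "hardly", "merely", "mildly", "nearly", "only",
   "partially", "partly", "practically", "scarcely", "slightly", "somewhat"]

def feature_46 (untagged_list : List String) : Int :=
  untagged_list.foldl (fun counter item =>
    if downtonerList.contains item then counter + 1 else counter) 0

-- ===== PORT B =====
def feature_46_alt (untagged_list : List String) : Int :=
  let freq : PySem.Dict String Int :=
    untagged_list.foldl (fun d item => d.insert item (d.getD item 0 + 1)) PySem.Dict.empty
  downtonerList.foldl (fun acc w => acc + freq.getD w 0) 0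

-- ===== PRECONDITION & SPEC =====
def Spec_feature_46 (untagged_list : List String) (out : Int) : Prop := out = feature_46_alt untagged_list
instance (untagged_list : List String) (out : Int) : Decidable (Spec_feature_46 untagged_list out) := by unfold Spec_feature_46; infer_instance

-- ===== CLAIM (what is proved, stated in full; the proofs are below) =====
def Claim_equal_feature_46 : Prop := ∀ (untagged_list : List String), Dom_feature_46 untagged_list → Spec_feature_46 untagged_list (feature_46 untagged_list)

-- ===== LEMMAS AND PROOFS =====

-- A's loop, with accumulator generalized, counts the items satisfying the membership test.
theorem feature46_foldl_countP (xs : List String) (c : Int) :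
    xs.foldl (fun counter item =>
      if downtonerList.contains item then counter + 1 else counter) c
      = c + (xs.countP (fun item => downtonerList.contains item) : Int) := by
  induction xs generalizing c with
  | nil => simp
  | cons x xs ih =>
    simp only [List.foldl_cons, List.countP_cons, ih]
    split_ifs with h <;> simp [h] <;> push_cast <;> ring

-- Summing per-word occurrence counts over a list of distinct words counts the items
-- that occur among those words.
-- With w not among dl, counting matches against (w :: dl) splits into count of w plus matches against dl.
theorem countP_cons_split (w : String) (dl : List String) (hw : w ∉ dl) (xs : List String) :
    xs.countP (fun item => (w :: dl).contains item)
      = xs.count w + xs.countP (fun item => dl.contains item) := by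
  induction xs with
  | nil => simp
  | cons x xs ihx =>
    simp only [List.countP_cons, List.count_cons, ihx]
    by_cases hx : x = w
    · subst hx
      simp [hw]
      omega
    · by_cases hd : x ∈ dl <;> simp [hx, hd, Ne.symm hx] <;> omega

theorem sum_counts_eq_countP (dl : List String) (hnd : dl.Nodup) (xs : List String) (c : Int) :
    dl.foldl (fun acc w => acc + (xs.count w : Int)) c
      = c + (xs.countP (fun item => dl.contains item) : Int) := by
  induction dl generalizing c with
  | nil => simp [List.countP_eq_zero]
  | cons w dl ih =>
    have hw : w ∉ dl := (List.nodup_cons.mp hnd).1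
    simp only [List.foldl_cons, ih (List.nodup_cons.mp hnd).2]
    rw [countP_cons_split w dl hw xs]
    push_cast
    ring

theorem feature_46_eq (xs : List String) : feature_46 xs = feature_46_alt xs := by
  unfold feature_46 feature_46_alt
  rw [feature46_foldl_countP]
  rw [show (fun (d : PySem.Dict String Int) item => d.insert item (d.getD item 0 + 1))
      = (fun d x => d.insert x (d.getD x 0 + 1)) from rfl]
  rw [PySem.Dict.foldl_insert_getD_add_one_eq_counter]
  have : ∀ c : Int, downtonerList.foldl (fun acc w => acc + (PySem.Dict.counter xs).getD w 0) c
      = downtonerList.foldl (fun acc w => acc + (xs.count w : Int)) c := by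
    intro c
    simp [PySem.Dict.getD_counter]
  rw [this 0, sum_counts_eq_countP downtonerList (by decide) xs 0]

-- ===== VERDICT (by name: the statement is the Claim_ definition above) =====
theorem feature_46_spec : Claim_equal_feature_46 := by
  intro xs _
  exact feature_46_eq xs
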